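-- pv_equiv track=rewrite | github.com/ichsanulaulia/KIJ-Kelompok-1 | Encryptions/IchsanulAulia/test.py | split2Ascii
-- ===== SOURCE A (Python) =====
-- def split2Ascii(text):
--     result = list()
--     i = 0
--     while i < len(text):
--         if(text[i] == '1'):
--             result.append(text[i:i+3])
--             i+=3
--         else:
--             result.append(text[i:i+2])
--             i+=2
--     return result
-- ===== SOURCE B (Python) =====
-- import re
--
-- def split2Ascii(text):
--     # Regex tokenizer: a '1' grabs up to two following chars (3-char chunk),
--     # otherwise one or two chars (2-char chunk); DOTALL so '.' matches newlines.
--     return re.findall(r'1.{0,2}|.{1,2}', text, re.S)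
-- ===== Notes on version B (the rewrite author's own statement) =====
-- stated objective: idiomatic
-- what changed: Replaces the manual while-loop with index arithmetic and slicing by a single regex tokenizer re.findall(r'1.{0,2}|.{1,2}', text, re.S) that matches the 3-char ('1'-led) or 2-char chunks directly.
import Mathlib
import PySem

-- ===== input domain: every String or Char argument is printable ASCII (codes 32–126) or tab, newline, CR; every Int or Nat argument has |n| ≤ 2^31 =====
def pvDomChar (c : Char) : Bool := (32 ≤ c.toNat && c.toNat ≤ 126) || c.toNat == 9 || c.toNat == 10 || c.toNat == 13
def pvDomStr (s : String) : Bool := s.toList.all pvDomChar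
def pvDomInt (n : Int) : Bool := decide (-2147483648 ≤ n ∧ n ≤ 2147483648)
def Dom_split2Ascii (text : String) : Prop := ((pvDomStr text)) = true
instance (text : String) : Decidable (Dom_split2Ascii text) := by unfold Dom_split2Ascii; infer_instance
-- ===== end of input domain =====

-- B replaces A's while-loop index arithmetic by a regex tokenizer (re.findall) that matches
-- each 3-char ('1'-led) or 2-char chunk directly; same output, idiomatic one-liner.


-- ===== PORT A =====
-- A's while loop: index i, append text[i:i+3] or text[i:i+2] to result.
def split2AsciiGo (cs : List Char) (i : Nat) (result : List String) : List String :=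
  if i < cs.length then
    if cs.getD i ' ' = '1' then
      split2AsciiGo cs (i + 3)
        (result ++ [String.ofList (PySem.List.slice cs (some (i : Int)) (some ((i : Int) + 3)))])
    else
      split2AsciiGo cs (i + 2)
        (result ++ [String.ofList (PySem.List.slice cs (some (i : Int)) (some ((i : Int) + 2)))])
  else result
termination_by cs.length - i

def split2Ascii (text : String) : List String := split2AsciiGo text.toList 0 []

-- ===== PORT B =====
-- Hand port of Source B's regex scan (exact for this pattern): at each position the alternation
-- '1.{0,2}' takes a '1' plus up to two more chars, else '.{1,2}' takes up to two chars.
def split2AsciiTok : List Char → List String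
  | [] => []
  | c :: rest =>
    if c = '1' then String.ofList (c :: rest.take 2) :: split2AsciiTok (rest.drop 2)
    else String.ofList (c :: rest.take 1) :: split2AsciiTok (rest.drop 1)
termination_by cs => cs.length
decreasing_by
  · simp only [List.length_cons, List.length_drop]; omega
  · simp only [List.length_cons, List.length_drop]; omega

def split2Ascii_alt (text : String) : List String := split2AsciiTok text.toList

-- ===== PRECONDITION & SPEC =====
def Spec_split2Ascii (text : String) (out : List String) : Prop := out = split2Ascii_alt text
instance (text : String) (out : List String) : Decidable (Spec_split2Ascii text out) := by unfold Spec_split2Ascii; infer_instance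

-- ===== CLAIM (what is proved, stated in full; the proofs are below) =====
def Claim_equal_split2Ascii : Prop := ∀ (text : String), Dom_split2Ascii text → Spec_split2Ascii text (split2Ascii text)

-- ===== LEMMAS AND PROOFS =====
theorem split2AsciiGo_eq (n : Nat) : ∀ (cs : List Char) (i : Nat) (result : List String),
    cs.length - i ≤ n →
    split2AsciiGo cs i result = result ++ split2AsciiTok (cs.drop i) := by
  induction n with
  | zero =>
    intro cs i result h
    have hge : cs.length ≤ i := by omega
    rw [split2AsciiGo]
    simp [Nat.not_lt.mpr hge, List.drop_eq_nil_of_le hge, split2AsciiTok]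
  | succ n ih =>
    intro cs i result h
    rw [split2AsciiGo]
    by_cases hlt : i < cs.length
    · have hd : cs.drop i = cs[i] :: cs.drop (i + 1) := List.drop_eq_getElem_cons hlt
      have hget : cs.getD i ' ' = cs[i] := by
        simp [List.getD_eq_getElem?_getD, List.getElem?_eq_getElem hlt]
      by_cases h1 : cs[i] = '1'
      · have hs : PySem.List.slice cs (some (i : Int)) (some ((i : Int) + 3))
            = (cs.drop i).take 3 := by
          have := PySem.List.slice_natCast (xs := cs) (a := i) (b := i + 3)
          simpa [Nat.add_sub_cancel_left] using this
        rw [if_pos hlt, hget, if_pos h1, ih cs (i + 3) _ (by omega), hs]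
        conv_rhs => rw [hd, split2AsciiTok]
        simp [h1, List.drop_drop]
        rw [hd, List.take_succ_cons, h1]
      · have hs : PySem.List.slice cs (some (i : Int)) (some ((i : Int) + 2))
            = (cs.drop i).take 2 := by
          have := PySem.List.slice_natCast (xs := cs) (a := i) (b := i + 2)
          simpa [Nat.add_sub_cancel_left] using this
        rw [if_pos hlt, hget, if_neg h1, ih cs (i + 2) _ (by omega), hs]
        conv_rhs => rw [hd, split2AsciiTok]
        simp [h1, List.drop_drop]
        rw [hd, List.take_succ_cons]
    · simp [hlt, List.drop_eq_nil_of_le (Nat.le_of_not_lt hlt), split2AsciiTok]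

-- ===== VERDICT (by name: the statement is the Claim_ definition above) =====
theorem split2Ascii_spec : Claim_equal_split2Ascii := by
  intro text _
  unfold Spec_split2Ascii split2Ascii split2Ascii_alt
  simpa using split2AsciiGo_eq text.toList.length text.toList 0 [] (by omega)
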